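-- pv_equiv track=rewrite | github.com/arnav0202006/Canary | backend/services/agent_executor.py | _generate_safe_response
-- ===== SOURCE A (Python) =====
-- def _generate_safe_response(violations: list, user_input: str) -> str:
--     """Generates a safe response when violations are detected"""
--     violation_types = [v.get("rule", "unknown") for v in violations]
--
--     if "behavioral_inconsistency" in violation_types:
--         return "I understand your request. Let me connect you with a human representative who can better assist you with this matter."
--
--     elif "frequent_failures" in violation_types:
--         return "I apologize for any inconvenience. A human representative will contact you shortly to help resolve your issue."
--
--     elif "potential_hallucination" in violation_types:
--         return "I need to verify some information. Let me connect you with a human representative who can provide accurate assistance."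
--
--     elif "inappropriate_actions" in violation_types:
--         return "For security reasons, I need to escalate this request. A human representative will contact you shortly."
--
--     else:
--         return "I apologize, but I need to escalate this request to ensure you receive the best possible assistance. A human representative will contact you shortly."
-- ===== SOURCE B (Python) =====
-- # Single pass computing the minimum severity rank over the violations, then
-- # indexing a response table -- replaces the membership cascade (alternative).
--
-- _RANK = {
--     "behavioral_inconsistency": 0,
--     "frequent_failures": 1,
--     "potential_hallucination": 2,
--     "inappropriate_actions": 3,
-- }
--
-- _RESPONSES = [
--     "I understand your request. Let me connect you with a human representative who can better assist you with this matter.",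
--     "I apologize for any inconvenience. A human representative will contact you shortly to help resolve your issue.",
--     "I need to verify some information. Let me connect you with a human representative who can provide accurate assistance.",
--     "For security reasons, I need to escalate this request. A human representative will contact you shortly.",
--     "I apologize, but I need to escalate this request to ensure you receive the best possible assistance. A human representative will contact you shortly.",
-- ]
--
--
-- def _generate_safe_response(violations: list, user_input: str) -> str:
--     best = 4
--     for v in violations:
--         r = _RANK.get(v.get("rule", "unknown"), 4)
--         if r < best:
--             best = r
--     return _RESPONSES[best]
-- ===== Notes on version B (the rewrite author's own statement) =====
-- stated objective: alternative
-- what changed: Instead of A's four separate membership tests over the collected rule-name list, B makes a single pass over the violations keeping a running minimum severity rank (0-3 per known rule, 4 otherwise) and indexes a response table with that minimum.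
import Mathlib
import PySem

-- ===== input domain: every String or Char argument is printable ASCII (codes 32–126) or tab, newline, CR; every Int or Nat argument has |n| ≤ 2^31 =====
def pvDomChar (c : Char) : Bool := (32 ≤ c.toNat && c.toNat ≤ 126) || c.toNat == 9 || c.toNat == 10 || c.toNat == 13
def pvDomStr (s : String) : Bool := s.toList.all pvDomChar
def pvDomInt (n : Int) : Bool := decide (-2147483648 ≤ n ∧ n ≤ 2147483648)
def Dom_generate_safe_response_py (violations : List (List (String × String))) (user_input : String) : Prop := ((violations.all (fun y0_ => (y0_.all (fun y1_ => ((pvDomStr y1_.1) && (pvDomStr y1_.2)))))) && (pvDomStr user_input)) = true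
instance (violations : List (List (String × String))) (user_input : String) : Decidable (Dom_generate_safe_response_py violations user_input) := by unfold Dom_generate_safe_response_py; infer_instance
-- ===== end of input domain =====

-- B replaces A's membership-test cascade with a single pass computing the minimum
-- severity rank over the violations and indexing a response table (alternative).


-- ===== PORT A =====
def generate_safe_response_py (violations : List (List (String × String))) (user_input : String) : String :=
  let violation_types := violations.map (fun v => PySem.Dict.getD (PySem.Dict.mk v) "rule" "unknown")
  if violation_types.contains "behavioral_inconsistency" then
    "I understand your request. Let me connect you with a human representative who can better assist you with this matter."
  else if violation_types.contains "frequent_failures" then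
    "I apologize for any inconvenience. A human representative will contact you shortly to help resolve your issue."
  else if violation_types.contains "potential_hallucination" then
    "I need to verify some information. Let me connect you with a human representative who can provide accurate assistance."
  else if violation_types.contains "inappropriate_actions" then
    "For security reasons, I need to escalate this request. A human representative will contact you shortly."
  else
    "I apologize, but I need to escalate this request to ensure you receive the best possible assistance. A human representative will contact you shortly."

-- ===== PORT B =====
-- _RANK.get(x, 4)
def pvRank (s : String) : Nat :=
  PySem.Dict.getD
    (PySem.Dict.mk
      [("behavioral_inconsistency", 0), ("frequent_failures", 1),
       ("potential_hallucination", 2), ("inappropriate_actions", 3)]) s 4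

def pvResponses : List String :=
  ["I understand your request. Let me connect you with a human representative who can better assist you with this matter.",
   "I apologize for any inconvenience. A human representative will contact you shortly to help resolve your issue.",
   "I need to verify some information. Let me connect you with a human representative who can provide accurate assistance.",
   "For security reasons, I need to escalate this request. A human representative will contact you shortly.",
   "I apologize, but I need to escalate this request to ensure you receive the best possible assistance. A human representative will contact you shortly."]

def generate_safe_response_py_alt (violations : List (List (String × String))) (user_input : String) : String :=
  let best :=
    violations.foldl
      (fun best v =>
        let r := pvRank (PySem.Dict.getD (PySem.Dict.mk v) "rule" "unknown")
        if r < best then r else best) 4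
  -- _RESPONSES[best]: exact here, since 0 ≤ best ≤ 4 < 5 always holds
  pvResponses.getD best ""

-- ===== PRECONDITION & SPEC =====
def Spec_generate_safe_response_py (violations : List (List (String × String))) (user_input : String) (out : String) : Prop := out = generate_safe_response_py_alt violations user_input
instance (violations : List (List (String × String))) (user_input : String) (out : String) : Decidable (Spec_generate_safe_response_py violations user_input out) := by unfold Spec_generate_safe_response_py; infer_instance

-- ===== CLAIM (what is proved, stated in full; the proofs are below) =====
def Claim_equal_generate_safe_response_py : Prop := ∀ (violations : List (List (String × String))) (user_input : String), Dom_generate_safe_response_py violations user_input → Spec_generate_safe_response_py violations user_input (generate_safe_response_py violations user_input)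

-- ===== LEMMAS AND PROOFS =====

-- B's fold, phrased over the list of rule names
def pvBest (l : List String) (b : Nat) : Nat :=
  l.foldl (fun best s => if pvRank s < best then pvRank s else best) b

theorem pvNilGet (s : String) : (PySem.Dict.mk ([] : List (String × Nat))).get? s = none := rfl

theorem pvRank_le (s : String) : pvRank s ≤ 4 := by
  unfold pvRank
  simp only [PySem.Dict.getD_eq_get?_getD, PySem.Dict.get?_mk_cons, pvNilGet]
  split_ifs <;> simp

theorem pvRank_iff (s : String) :
    (pvRank s = 0 ↔ "behavioral_inconsistency" = s) ∧
    (pvRank s = 1 ↔ "frequent_failures" = s) ∧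
    (pvRank s = 2 ↔ "potential_hallucination" = s) ∧
    (pvRank s = 3 ↔ "inappropriate_actions" = s) := by
  unfold pvRank
  simp only [PySem.Dict.getD_eq_get?_getD, PySem.Dict.get?_mk_cons, pvNilGet]
  split_ifs with h1 h2 h3 h4 <;> simp_all <;> subst_vars <;> decide

theorem pvBest_minmin (l : List String) (b c : Nat) :
    pvBest l (min b c) = min b (pvBest l c) := by
  induction l generalizing b c with
  | nil => simp [pvBest]
  | cons s t ih =>
    have e1 : (if pvRank s < min b c then pvRank s else min b c)
        = min b (min c (pvRank s)) := by split_ifs <;> omega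
    have e2 : (if pvRank s < c then pvRank s else c) = min c (pvRank s) := by
      split_ifs <;> omega
    show pvBest t (if pvRank s < min b c then pvRank s else min b c)
        = min b (pvBest t (if pvRank s < c then pvRank s else c))
    rw [e1, e2, ih]

theorem pvBest_cons (s : String) (t : List String) :
    pvBest (s :: t) 4 = min (pvRank s) (pvBest t 4) := by
  have h4 := pvRank_le s
  have e : (if pvRank s < 4 then pvRank s else 4) = min (pvRank s) 4 := by
    split_ifs <;> omega
  show pvBest t (if pvRank s < 4 then pvRank s else 4) = _
  rw [e, pvBest_minmin]

-- characterization of the running minimum in terms of A's membership tests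
theorem pvBest_char (l : List String) :
    (pvBest l 4 ≤ 0 ↔ l.contains "behavioral_inconsistency" = true) ∧
    (pvBest l 4 ≤ 1 ↔ (l.contains "behavioral_inconsistency" ||
                       l.contains "frequent_failures") = true) ∧
    (pvBest l 4 ≤ 2 ↔ (l.contains "behavioral_inconsistency" ||
                       l.contains "frequent_failures" ||
                       l.contains "potential_hallucination") = true) ∧
    (pvBest l 4 ≤ 3 ↔ (l.contains "behavioral_inconsistency" ||
                       l.contains "frequent_failures" ||
                       l.contains "potential_hallucination" ||
                       l.contains "inappropriate_actions") = true) ∧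
    pvBest l 4 ≤ 4 := by
  induction l with
  | nil => simp [pvBest]
  | cons s t ih =>
    have hstep := pvBest_cons s t
    obtain ⟨r0, r1, r2, r3⟩ := pvRank_iff s
    obtain ⟨i0, i1, i2, i3, i4⟩ := ih
    have h4 := pvRank_le s
    rw [hstep]
    simp only [List.contains_cons, Bool.or_eq_true, beq_iff_eq, ← r0, ← r1, ← r2, ← r3]
    clear r0 r1 r2 r3
    by_cases c0 : t.contains "behavioral_inconsistency" = true <;>
    by_cases c1 : t.contains "frequent_failures" = true <;>
    by_cases c2 : t.contains "potential_hallucination" = true <;>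
    by_cases c3 : t.contains "inappropriate_actions" = true <;>
      simp_all <;> omega

-- ===== VERDICT (by name: the statement is the Claim_ definition above) =====
theorem generate_safe_response_py_spec : Claim_equal_generate_safe_response_py := by
  intro violations user_input _
  unfold Spec_generate_safe_response_py generate_safe_response_py generate_safe_response_py_alt
  have hfold :
      violations.foldl
        (fun best v =>
          let r := pvRank (PySem.Dict.getD (PySem.Dict.mk v) "rule" "unknown")
          if r < best then r else best) 4
      = pvBest (violations.map (fun v => PySem.Dict.getD (PySem.Dict.mk v) "rule" "unknown")) 4 := by
    simp [pvBest, List.foldl_map]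
  simp only [hfold]
  obtain ⟨i0, i1, i2, i3, i4⟩ :=
    pvBest_char (violations.map (fun v => PySem.Dict.getD (PySem.Dict.mk v) "rule" "unknown"))
  set n := pvBest (violations.map (fun v => PySem.Dict.getD (PySem.Dict.mk v) "rule" "unknown")) 4 with hn
  split_ifs with h0 h1 h2 h3
  · have : n = 0 := by have := i0.mpr h0; omega
    rw [this]; rfl
  · have hne0 : ¬ n ≤ 0 := fun h => h0 (i0.mp h)
    have : n = 1 := by
      have := i1.mpr (by simp only [Bool.or_eq_true]; tauto); omega
    rw [this]; rfl
  · have hne1 : ¬ n ≤ 1 := by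
      intro h
      rcases Bool.or_eq_true _ _ |>.mp (i1.mp h) with h' | h'
      · exact h0 h'
      · exact h1 h'
    have : n = 2 := by
      have := i2.mpr (by simp only [Bool.or_eq_true]; tauto); omega
    rw [this]; rfl
  · have hne2 : ¬ n ≤ 2 := by
      intro h
      have := i2.mp h
      simp only [Bool.or_eq_true] at this
      rcases this with (h' | h') | h'
      · exact h0 h'
      · exact h1 h'
      · exact h2 h'
    have : n = 3 := by
      have := i3.mpr (by simp only [Bool.or_eq_true]; tauto); omega
    rw [this]; rfl
  · have hne3 : ¬ n ≤ 3 := by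
      intro h
      have := i3.mp h
      simp only [Bool.or_eq_true] at this
      rcases this with ((h' | h') | h') | h'
      · exact h0 h'
      · exact h1 h'
      · exact h2 h'
      · exact h3 h'
    have : n = 4 := by omega
    rw [this]; rfl
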